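-- pv_equiv track=rewrite | github.com/kspangsege/archon | python/archon/core.py | clamped_quote
-- ===== SOURCE A (Python) =====
-- def clamped_quote(string, max_size):
--     ellipsis = "..."
--     min_max_size = 2 + len(ellipsis)
--     if max_size < min_max_size:
--         max_size = min_max_size
--     limit_2 = max_size - 2
--     limit_1 = limit_2 - len(ellipsis)
--     string_2 = ""
--     breach_pos = None
--     for ch in string:
--         repl = _quote_repl(ch)
--         if breach_pos is None:
--             if len(repl) <= limit_1 - len(string_2):
--                 string_2 += repl
--                 continue
--             breach_pos = len(string_2)
--         if len(repl) <= limit_2 - len(string_2):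
--             string_2 += repl
--             continue
--         return "\"%s...\"" % string_2[:breach_pos]
--     return "\"%s\"" % string_2
--
-- def _quote_repl(ch):
--     repl = _simple_escapes.get(ch)
--     if repl is not None:
--         return repl
--     if ch.isprintable():
--         return ch
--     val = ord(ch)
--     if val <= 0xFFFF:
--         return "\\u%04X" % val
--     assert val <= 0xFFFFFFFF
--     return "\\U%08X" % val
--
-- _simple_escapes = {
--     "\a": "\\a",
--     "\b": "\\b",
--     "\t": "\\t",
--     "\n": "\\n",
--     "\v": "\\v",
--     "\f": "\\f",
--     "\r": "\\r",
--     "\"": "\\\"",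
--     "\\": "\\\\",
-- }
-- ===== SOURCE B (Python) =====
-- # B: escape everything eagerly, build a prefix-sum array of escaped lengths,
-- # then decide full vs truncated by the total and find the cut with binary search.
--
-- _simple_escapes = {
--     "\a": "\\a",
--     "\b": "\\b",
--     "\t": "\\t",
--     "\n": "\\n",
--     "\v": "\\v",
--     "\f": "\\f",
--     "\r": "\\r",
--     "\"": "\\\"",
--     "\\": "\\\\",
-- }
--
-- def _quote_repl(ch):
--     repl = _simple_escapes.get(ch)
--     if repl is not None:
--         return repl
--     if ch.isprintable():
--         return ch
--     val = ord(ch)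
--     if val <= 0xFFFF:
--         return "\\u%04X" % val
--     return "\\U%08X" % val
--
-- def clamped_quote(string, max_size):
--     ellipsis = "..."
--     limit_2 = max(max_size, 2 + len(ellipsis)) - 2
--     limit_1 = limit_2 - len(ellipsis)
--     repls = [_quote_repl(ch) for ch in string]
--     sums = [0]
--     for r in repls:
--         sums.append(sums[-1] + len(r))
--     if sums[-1] <= limit_2:
--         return '"%s"' % "".join(repls)
--     # largest index lo with sums[lo] <= limit_1 (binary search; sums is nondecreasing)
--     lo, hi = 0, len(sums) - 1
--     while lo < hi:
--         mid = (lo + hi + 1) // 2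
--         if sums[mid] <= limit_1:
--             lo = mid
--         else:
--             hi = mid - 1
--     return '"%s..."' % "".join(repls[:lo])
-- ===== Notes on version B (the rewrite author's own statement) =====
-- stated objective: alternative
-- what changed: Replaces A's single-pass state machine (incremental append with a breach_pos flag and early return) by eager escaping of every character, an explicit prefix-sum array of escaped lengths, a total-vs-limit_2 test, and a binary search over the prefix sums for the ellipsis cut point.
import Mathlib
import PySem

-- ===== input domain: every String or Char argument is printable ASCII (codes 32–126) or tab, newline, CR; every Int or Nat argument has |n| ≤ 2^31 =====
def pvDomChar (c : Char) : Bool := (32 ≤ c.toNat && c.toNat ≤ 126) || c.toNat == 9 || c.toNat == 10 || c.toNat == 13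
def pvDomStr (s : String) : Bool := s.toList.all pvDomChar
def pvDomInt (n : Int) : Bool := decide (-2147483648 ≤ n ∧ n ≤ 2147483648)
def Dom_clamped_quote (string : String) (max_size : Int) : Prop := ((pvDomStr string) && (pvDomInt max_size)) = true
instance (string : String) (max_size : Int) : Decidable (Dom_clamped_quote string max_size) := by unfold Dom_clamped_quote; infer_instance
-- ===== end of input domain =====

-- B escapes all characters eagerly, builds a prefix-sum array of escaped lengths and locates the
-- ellipsis cut by a binary search over it, instead of A's one-pass breach-tracking state machine;
-- objective: alternative decomposition (no speed claim).

-- ===== PORT A =====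
-- _quote_repl: identical helper in both Pythons; exact on the printable-ASCII + tab/newline/CR
-- domain (the `[ch]` default is Python's `ch.isprintable()` branch, exact for printable chars;
-- the \u/\U branches are unreachable on Dom and are represented by the same default).
def quoteRepl (ch : Char) : List Char :=
  if ch = '\x07' then ['\\', 'a']
  else if ch = '\x08' then ['\\', 'b']
  else if ch = '\t' then ['\\', 't']
  else if ch = '\n' then ['\\', 'n']
  else if ch = '\x0b' then ['\\', 'v']
  else if ch = '\x0c' then ['\\', 'f']
  else if ch = '\r' then ['\\', 'r']
  else if ch = '"' then ['\\', '\"']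
  else if ch = '\\' then ['\\', '\\']
  else [ch]

-- A's for-loop: state = (string_2, breach_pos), early return on the limit_2 breach.
-- string_2[:breach_pos] with breach_pos = a previous len(string_2) ≥ 0 is List.take.
def cqLoop (limit1 limit2 : Int) : List Char → List Char → Option Nat → String
  | [], s2, _ => "\"" ++ String.ofList s2 ++ "\""
  | ch :: rest, s2, bp =>
    let repl := quoteRepl ch
    match bp with
    | none =>
      if (repl.length : Int) ≤ limit1 - (s2.length : Int) then
        cqLoop limit1 limit2 rest (s2 ++ repl) none
      else
        let bp' := s2.length
        if (repl.length : Int) ≤ limit2 - (s2.length : Int) then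
          cqLoop limit1 limit2 rest (s2 ++ repl) (some bp')
        else
          "\"" ++ String.ofList (s2.take bp') ++ "...\""
    | some b =>
      if (repl.length : Int) ≤ limit2 - (s2.length : Int) then
        cqLoop limit1 limit2 rest (s2 ++ repl) (some b)
      else
        "\"" ++ String.ofList (s2.take b) ++ "...\""

def clamped_quote (string : String) (max_size : Int) : String :=
  let min_max_size : Int := 2 + 3        -- 2 + len("...")
  let ms := if max_size < min_max_size then min_max_size else max_size
  let limit2 := ms - 2
  let limit1 := limit2 - 3
  cqLoop limit1 limit2 string.toList [] none

-- ===== PORT B =====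
-- sums.append(sums[-1] + len(r)) ; sums starts as [0] so getLastD 0 is exact.
def buildSums : List (List Char) → List Int → List Int
  | [], sums => sums
  | r :: rest, sums => buildSums rest (sums ++ [sums.getLastD 0 + (r.length : Int)])

-- the while-loop binary search; indices are always in range, so getD 0 is exact.
def bsearch (sums : List Int) (limit1 : Int) (lo hi : Nat) : Nat :=
  if h : lo < hi then
    let mid := (lo + hi + 1) / 2
    if sums.getD mid 0 ≤ limit1 then bsearch sums limit1 mid hi
    else bsearch sums limit1 lo (mid - 1)
  else lo
termination_by hi - lo
decreasing_by all_goals omega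

def clamped_quote_alt (string : String) (max_size : Int) : String :=
  let limit2 : Int := max max_size (2 + 3) - 2
  let limit1 : Int := limit2 - 3
  let repls := string.toList.map quoteRepl
  let sums := buildSums repls [0]
  if sums.getLastD 0 ≤ limit2 then
    "\"" ++ String.ofList repls.flatten ++ "\""
  else
    let lo := bsearch sums limit1 0 (sums.length - 1)
    "\"" ++ String.ofList (repls.take lo).flatten ++ "...\""

-- ===== PRECONDITION & SPEC =====
def Spec_clamped_quote (string : String) (max_size : Int) (out : String) : Prop := out = clamped_quote_alt string max_size
instance (string : String) (max_size : Int) (out : String) : Decidable (Spec_clamped_quote string max_size out) := by unfold Spec_clamped_quote; infer_instance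

-- ===== CLAIM (what is proved, stated in full; the proofs are below) =====
def Claim_equal_clamped_quote : Prop := ∀ (string : String) (max_size : Int), Dom_clamped_quote string max_size → Spec_clamped_quote string max_size (clamped_quote string max_size)

-- ===== LEMMAS AND PROOFS =====

-- total escaped length of a list of replacements
def sumLens (rs : List (List Char)) : Nat := (rs.map List.length).sum

-- the prefix of rs that A keeps before the limit_1 breach, starting at accumulated length n
def fitPrefix (l1 : Int) : Nat → List (List Char) → List (List Char)
  | _, [] => []
  | n, r :: rest =>
    if ((n + r.length : Nat) : Int) ≤ l1 then r :: fitPrefix l1 (n + r.length) rest else []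

theorem sumLens_cons (r : List Char) (rs : List (List Char)) :
    sumLens (r :: rs) = r.length + sumLens rs := by simp [sumLens]

theorem sumLens_take_le (rs : List (List Char)) (i j : Nat) (h : i ≤ j) :
    sumLens (rs.take i) ≤ sumLens (rs.take j) := by
  induction rs generalizing i j with
  | nil => simp [sumLens]
  | cons r rs ih =>
    cases i with
    | zero => simp [sumLens]
    | succ i' =>
      cases j with
      | zero => omega
      | succ j' =>
        simp only [List.take_succ_cons, sumLens_cons]
        have := ih i' j' (by omega)
        omega

-- phase 2 of A's loop: breach recorded, everything up to limit_2 still appended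
theorem cqLoop_some (l1 l2 : Int) (chs : List Char) :
    ∀ (s2 : List Char) (b : Nat), b ≤ s2.length → (s2.length : Int) ≤ l2 →
    cqLoop l1 l2 chs s2 (some b) =
      if ((s2.length + sumLens (chs.map quoteRepl) : Nat) : Int) ≤ l2 then
        "\"" ++ String.ofList (s2 ++ (chs.map quoteRepl).flatten) ++ "\""
      else
        "\"" ++ String.ofList (s2.take b) ++ "...\"" := by
  induction chs with
  | nil =>
    intro s2 b hb h2
    simp only [cqLoop, List.map_nil, List.flatten_nil, List.append_nil, sumLens]
    rw [if_pos (by push_cast; simpa using h2)]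
  | cons ch rest ih =>
    intro s2 b hb h2
    simp only [cqLoop, List.map_cons, List.flatten_cons, sumLens_cons]
    by_cases hfit : ((quoteRepl ch).length : Int) ≤ l2 - (s2.length : Int)
    · rw [if_pos hfit]
      rw [ih (s2 ++ quoteRepl ch) b (by simpa using Nat.le_trans hb (by simp))
            (by simp only [List.length_append]; push_cast at hfit ⊢; omega)]
      have hc : (((s2 ++ quoteRepl ch).length + sumLens (rest.map quoteRepl) : Nat) : Int) ≤ l2 ↔
          ((s2.length + ((quoteRepl ch).length + sumLens (rest.map quoteRepl)) : Nat) : Int) ≤ l2 := by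
        push_cast; simp; omega
      by_cases hcl : (((s2 ++ quoteRepl ch).length + sumLens (rest.map quoteRepl) : Nat) : Int) ≤ l2
      · rw [if_pos hcl, if_pos (hc.mp hcl)]; simp
      · rw [if_neg hcl, if_neg (fun h => hcl (hc.mpr h))]
        rw [List.take_append_of_le_length hb]
    · rw [if_neg hfit]
      rw [if_neg (by push_cast at hfit ⊢; omega)]

-- phase 1 of A's loop: closed form
theorem cqLoop_none (l1 l2 : Int) (hl : l1 + 3 = l2) (chs : List Char) :
    ∀ (s2 : List Char), (s2.length : Int) ≤ l1 →
    cqLoop l1 l2 chs s2 none =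
      if ((s2.length + sumLens (chs.map quoteRepl) : Nat) : Int) ≤ l2 then
        "\"" ++ String.ofList (s2 ++ (chs.map quoteRepl).flatten) ++ "\""
      else
        "\"" ++ String.ofList (s2 ++ (fitPrefix l1 s2.length (chs.map quoteRepl)).flatten) ++ "...\"" := by
  induction chs with
  | nil =>
    intro s2 h1
    simp only [cqLoop, List.map_nil, List.flatten_nil, List.append_nil, sumLens]
    rw [if_pos (by simp; omega)]
  | cons ch rest ih =>
    intro s2 h1
    simp only [cqLoop, List.map_cons, List.flatten_cons, sumLens_cons, fitPrefix]
    by_cases hfit1 : ((quoteRepl ch).length : Int) ≤ l1 - (s2.length : Int)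
    · rw [if_pos hfit1]
      rw [ih (s2 ++ quoteRepl ch) (by simp; omega)]
      have hc : (((s2 ++ quoteRepl ch).length + sumLens (rest.map quoteRepl) : Nat) : Int) ≤ l2 ↔
          ((s2.length + ((quoteRepl ch).length + sumLens (rest.map quoteRepl)) : Nat) : Int) ≤ l2 := by
        push_cast; simp; omega
      rw [if_pos (show ((s2.length + (quoteRepl ch).length : Nat) : Int) ≤ l1 by push_cast; omega)]
      by_cases hcl : (((s2 ++ quoteRepl ch).length + sumLens (rest.map quoteRepl) : Nat) : Int) ≤ l2
      · rw [if_pos hcl, if_pos (hc.mp hcl)]; simp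
      · rw [if_neg hcl, if_neg (fun h => hcl (hc.mpr h))]; simp
    · rw [if_neg hfit1]
      rw [if_neg (show ¬ ((s2.length + (quoteRepl ch).length : Nat) : Int) ≤ l1 by push_cast; omega)]
      by_cases hfit2 : ((quoteRepl ch).length : Int) ≤ l2 - (s2.length : Int)
      · rw [if_pos hfit2]
        rw [cqLoop_some l1 l2 rest (s2 ++ quoteRepl ch) s2.length (by simp)
              (by simp; omega)]
        have hc : (((s2 ++ quoteRepl ch).length + sumLens (rest.map quoteRepl) : Nat) : Int) ≤ l2 ↔
            ((s2.length + ((quoteRepl ch).length + sumLens (rest.map quoteRepl)) : Nat) : Int) ≤ l2 := by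
          push_cast; simp; omega
        by_cases hcl : (((s2 ++ quoteRepl ch).length + sumLens (rest.map quoteRepl) : Nat) : Int) ≤ l2
        · rw [if_pos hcl, if_pos (hc.mp hcl)]; simp
        · rw [if_neg hcl, if_neg (fun h => hcl (hc.mpr h))]
          rw [List.take_append_of_le_length (Nat.le_refl _)]
          simp
      · rw [if_neg hfit2]
        rw [if_neg (show ¬ ((s2.length + ((quoteRepl ch).length + sumLens (rest.map quoteRepl)) : Nat) : Int) ≤ l2
              by push_cast; omega)]
        simp

-- buildSums produces exactly the prefix sums, shifted by the last entry of the accumulator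
theorem buildSums_gen (rs : List (List Char)) :
    ∀ (acc : List Int),
    buildSums rs acc = acc ++ (List.range rs.length).map
      (fun i => acc.getLastD 0 + (sumLens (rs.take (i + 1)) : Int)) := by
  induction rs with
  | nil => intro acc; simp [buildSums]
  | cons r rest ih =>
    intro acc
    rw [buildSums, ih]
    simp only [List.length_cons]
    rw [List.range_succ_eq_map]
    simp only [List.map_cons, List.map_map]
    rw [List.getLastD_concat]
    simp only [List.take_succ_cons, sumLens_cons, List.take_zero]
    rw [List.append_assoc]
    congr 1
    simp only [List.cons_append, List.nil_append]
    congr 1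
    apply List.map_congr_left
    intro i _
    simp only [Function.comp_apply, Nat.succ_eq_add_one]
    push_cast
    ring

theorem buildSums_eq (rs : List (List Char)) :
    buildSums rs [0] = (List.range (rs.length + 1)).map (fun i => (sumLens (rs.take i) : Int)) := by
  rw [buildSums_gen, List.range_succ_eq_map]
  simp [sumLens, List.map_map, Function.comp]

theorem bsearch_spec (S : List Int) (l1 : Int)
    (mono : ∀ i j, i ≤ j → j < S.length → S.getD i 0 ≤ S.getD j 0) :
    ∀ (k lo hi : Nat), hi - lo = k → lo ≤ hi → hi < S.length → S.getD lo 0 ≤ l1 →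
    (∀ j, hi < j → j < S.length → l1 < S.getD j 0) →
    S.getD (bsearch S l1 lo hi) 0 ≤ l1 ∧
      (∀ j, bsearch S l1 lo hi < j → j < S.length → l1 < S.getD j 0) ∧
      bsearch S l1 lo hi ≤ hi := by
  intro k
  induction k using Nat.strong_induction_on with
  | _ k ih =>
    intro lo hi hk hle hhi hlo hhij
    rw [bsearch]
    by_cases h : lo < hi
    · rw [dif_pos h]
      by_cases hm : S.getD ((lo + hi + 1) / 2) 0 ≤ l1
      · rw [if_pos hm]
        have := ih (hi - (lo + hi + 1) / 2) (by omega) ((lo + hi + 1) / 2) hi rfl (by omega) hhi hm hhij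
        exact this
      · rw [if_neg hm]
        have hnext : ∀ j, (lo + hi + 1) / 2 - 1 < j → j < S.length → l1 < S.getD j 0 := by
          intro j hj hjl
          by_cases hjh : hi < j
          · exact hhij j hjh hjl
          · have : S.getD ((lo + hi + 1) / 2) 0 ≤ S.getD j 0 :=
              mono _ j (by omega) hjl
            omega
        have := ih ((lo + hi + 1) / 2 - 1 - lo) (by omega) lo ((lo + hi + 1) / 2 - 1) rfl
          (by omega) (by omega) hlo hnext
        exact ⟨this.1, this.2.1, by omega⟩
    · rw [dif_neg h]
      exact ⟨hlo, fun j hj hjl => hhij j (by omega) hjl, hle⟩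

theorem fit_take (l1 : Int) (rs : List (List Char)) :
    ∀ (n m : Nat), m ≤ rs.length →
    ((n + sumLens (rs.take m) : Nat) : Int) ≤ l1 →
    (m = rs.length ∨ l1 < ((n + sumLens (rs.take (m + 1)) : Nat) : Int)) →
    fitPrefix l1 n rs = rs.take m := by
  induction rs with
  | nil => intro n m _ _ _; simp [fitPrefix]
  | cons r rest ih =>
    intro n m hm hfit hstop
    cases m with
    | zero =>
      have hlt : l1 < ((n + r.length : Nat) : Int) := by
        rcases hstop with h | h
        · simp at h
        · simpa [sumLens_cons, sumLens, Nat.cast_add] using h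
      rw [fitPrefix, if_neg (by push_cast at hlt ⊢; omega)]
      simp
    | succ m' =>
      simp only [List.take_succ_cons, sumLens_cons] at hfit hstop ⊢
      have hr : ((n + r.length : Nat) : Int) ≤ l1 := by push_cast at hfit ⊢; omega
      rw [fitPrefix, if_pos hr]
      rw [ih (n + r.length) m' (by simpa using hm)
            (by push_cast at hfit ⊢; omega)
            (by rcases hstop with h | h
                · left; simpa using h
                · right; push_cast at h ⊢; omega)]

theorem map_range_getD (m : Nat) (f : Nat → Int) (i : Nat) (hi : i < m) :
    ((List.range m).map f).getD i 0 = f i := by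
  rw [List.getD_eq_getElem?_getD]
  simp [hi]

theorem range_map_getLastD (m : Nat) (f : Nat → Int) :
    ((List.range (m + 1)).map f).getLastD 0 = f m := by
  rw [List.range_succ]
  simp

-- the common closed form of both ports, for fixed limits
theorem main_eq (cs : List Char) (l1 l2 : Int) (hl : l1 + 3 = l2) (h0 : 0 ≤ l1) :
    cqLoop l1 l2 cs [] none =
      (if (buildSums (cs.map quoteRepl) [0]).getLastD 0 ≤ l2 then
        "\"" ++ String.ofList (cs.map quoteRepl).flatten ++ "\""
      else
        "\"" ++ String.ofList (((cs.map quoteRepl).take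
            (bsearch (buildSums (cs.map quoteRepl) [0]) l1 0
              ((buildSums (cs.map quoteRepl) [0]).length - 1))).flatten) ++ "...\"") := by
  rw [cqLoop_none l1 l2 hl cs [] (by simp; omega)]
  rw [buildSums_eq, range_map_getLastD]
  have htake : (cs.map quoteRepl).take (cs.map quoteRepl).length = cs.map quoteRepl :=
    List.take_length ..
  rw [htake]
  have hcond : (((([] : List Char).length + sumLens (cs.map quoteRepl) : Nat)) : Int) ≤ l2 ↔
      ((sumLens (cs.map quoteRepl) : Nat) : Int) ≤ l2 := by simp
  by_cases htot : ((sumLens (cs.map quoteRepl) : Nat) : Int) ≤ l2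
  · rw [if_pos (hcond.mpr htot), if_pos htot]
    simp
  · rw [if_neg (fun h => htot (hcond.mp h)), if_neg htot]
    set repls := cs.map quoteRepl with hrepls
    set S := (List.range (repls.length + 1)).map (fun i => (sumLens (repls.take i) : Int)) with hS
    have hSlen : S.length = repls.length + 1 := by simp [hS]
    have mono : ∀ i j, i ≤ j → j < S.length → S.getD i 0 ≤ S.getD j 0 := by
      intro i j hij hj
      rw [hSlen] at hj
      rw [hS, map_range_getD _ _ i (by omega), map_range_getD _ _ j (by omega)]
      exact_mod_cast sumLens_take_le repls i j hij
    have hspec := bsearch_spec S l1 mono repls.length 0 repls.length rfl (by omega)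
      (by omega)
      (by rw [hS, map_range_getD _ _ 0 (by omega)]; simpa [sumLens] using h0)
      (by intro j hj hjl; rw [hSlen] at hjl; omega)
    set r := bsearch S l1 0 repls.length with hrdef
    have hrle : r ≤ repls.length := hspec.2.2
    have hr1 : ((sumLens (repls.take r) : Nat) : Int) ≤ l1 := by
      have := hspec.1
      rwa [hS, map_range_getD _ _ r (by omega)] at this
    have hr2 : r = repls.length ∨ l1 < ((0 + sumLens (repls.take (r + 1)) : Nat) : Int) := by
      by_cases hre : r = repls.length
      · exact Or.inl hre
      · right
        have := hspec.2.1 (r + 1) (by omega) (by omega)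
        rw [hS, map_range_getD _ _ (r + 1) (by omega)] at this
        simpa using this
    have hfit := fit_take l1 repls 0 r hrle (by simpa using hr1) hr2
    have harg : S.length - 1 = repls.length := by rw [hSlen]; omega
    rw [harg, ← hrdef]
    simp only [List.length_nil, List.nil_append]
    rw [hfit]

-- ===== VERDICT (by name: the statement is the Claim_ definition above) =====
theorem clamped_quote_spec : Claim_equal_clamped_quote := by
  intro string max_size _
  have hms : (if max_size < 2 + 3 then (2 + 3 : Int) else max_size) = max max_size (2 + 3) := by
    split_ifs with h
    · exact (max_eq_right (by omega)).symm
    · exact (max_eq_left (by omega)).symm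
  unfold Spec_clamped_quote clamped_quote clamped_quote_alt
  simp only [hms]
  exact main_eq string.toList _ _ (by ring)
    (by have := le_max_right max_size (2 + 3 : Int); omega)
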